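-- pv_equiv track=rewrite | github.com/MayTheCutie/rotPred | util/utils.py | find_longest_consecutive_indices
-- ===== SOURCE A (Python) =====
-- from typing import Callable, Dict, Optional, Tuple, Type, Union, List
--
-- def find_longest_consecutive_indices(nums:List[int]):
--     """
--     Find the indices of the longest consecutive sequence of numbers.
--     Args:
--         nums (List[int]): The list of numbers.
--     Returns:
--         Tuple[int, int]: The start and end indices of the longest consecutive sequence.
--     """
--     start, end = 0, 0
--     longest_start, longest_end = 0, 0
--     max_length = 0
--
--     for i in range(1, len(nums)):
--         if nums[i] == nums[i-1] + 1:
--             end = i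
--         else:
--             start = i
--
--         if end - start > max_length:
--             max_length = end - start
--             longest_start = start
--             longest_end = end
--
--     return longest_start, longest_end
-- ===== SOURCE B (Python) =====
-- from itertools import groupby
--
-- def find_longest_consecutive_indices(nums):
--     """Derived-array decomposition: diff array, then groupby-scan for the
--     longest maximal run of 1s (leftmost on ties)."""
--     diffs = [b - a for a, b in zip(nums, nums[1:])]
--     best_len, best_start = 0, 0
--     pos = 0
--     for val, grp in groupby(diffs):
--         k = sum(1 for _ in grp)
--         if val == 1 and k > best_len:
--             best_len, best_start = k, pos
--         pos += k
--     if best_len == 0: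
--         return (0, 0)
--     return (best_start, best_start + best_len)
-- ===== Notes on version B (the rewrite author's own statement) =====
-- stated objective: alternative
-- what changed: Replaces A's incremental start/end boundary bookkeeping with a derived difference array that is scanned with itertools.groupby for the longest maximal run of 1s (leftmost on ties), converting the run's position to indices at the end.
import Mathlib
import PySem

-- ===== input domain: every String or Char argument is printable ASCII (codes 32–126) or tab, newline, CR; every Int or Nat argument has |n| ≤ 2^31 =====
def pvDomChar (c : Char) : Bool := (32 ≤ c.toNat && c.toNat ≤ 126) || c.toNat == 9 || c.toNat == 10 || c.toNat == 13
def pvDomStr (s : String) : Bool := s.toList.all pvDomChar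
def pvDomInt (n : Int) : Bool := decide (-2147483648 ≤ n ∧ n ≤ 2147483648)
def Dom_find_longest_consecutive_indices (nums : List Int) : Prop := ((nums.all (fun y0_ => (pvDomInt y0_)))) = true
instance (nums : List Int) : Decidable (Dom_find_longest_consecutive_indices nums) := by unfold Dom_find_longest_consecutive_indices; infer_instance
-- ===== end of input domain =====

-- B replaces A's incremental start/end boundary bookkeeping with a difference array scanned
-- by maximal runs (groupby); an alternative decomposition with the same return value.

-- ===== PORT A =====
-- loop body of A's for-loop; state = (start, end, longest_start, longest_end, max_length)
def pvStepA (nums : List Int) (st : Int × Int × Int × Int × Int) (i : Int) :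
    Int × Int × Int × Int × Int :=
  let p := if PySem.List.pyGetD nums i 0 = PySem.List.pyGetD nums (i - 1) 0 + 1
           then (st.1, i) else (i, st.2.1)
  if p.2 - p.1 > st.2.2.2.2 then (p.1, p.2, p.1, p.2, p.2 - p.1)
  else (p.1, p.2, st.2.2.1, st.2.2.2.1, st.2.2.2.2)

def find_longest_consecutive_indices (nums : List Int) : Int × Int :=
  let st := (PySem.List.pyRange 1 (nums.length : Int) 1).foldl (pvStepA nums) (0, 0, 0, 0, 0)
  (st.2.2.1, st.2.2.2.1)

-- ===== PORT B =====
-- hand port of itertools.groupby over a List Int, exact for this use: the maximal runs of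
-- equal adjacent values, each with its count, in order
def pvRunLen (v : Int) : List Int → Nat
  | [] => 0
  | x :: xs => if x = v then pvRunLen v xs + 1 else 0

def pvGroups : List Int → List (Int × Int)
  | [] => []
  | x :: xs =>
      let k := pvRunLen x xs
      (x, (k : Int) + 1) :: pvGroups (xs.drop k)
  termination_by l => l.length
  decreasing_by simp only [List.length_drop, List.length_cons]; omega

-- loop body of B's for-loop; state = (best_len, best_start, pos), g = (val, count)
def pvStepB (st : Int × Int × Int) (g : Int × Int) : Int × Int × Int :=
  let p := if g.1 = 1 ∧ g.2 > st.1 then (g.2, st.2.2) else (st.1, st.2.1)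
  (p.1, p.2, st.2.2 + g.2)

def find_longest_consecutive_indices_alt (nums : List Int) : Int × Int :=
  let diffs := (nums.zip nums.tail).map (fun p => p.2 - p.1)
  let st := (pvGroups diffs).foldl pvStepB (0, 0, 0)
  if st.1 = 0 then (0, 0) else (st.2.1, st.2.1 + st.1)

-- ===== PRECONDITION & SPEC =====
def Spec_find_longest_consecutive_indices (nums : List Int) (out : Int × Int) : Prop := out = find_longest_consecutive_indices_alt nums
instance (nums : List Int) (out : Int × Int) : Decidable (Spec_find_longest_consecutive_indices nums out) := by unfold Spec_find_longest_consecutive_indices; infer_instance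

-- ===== CLAIM (what is proved, stated in full; the proofs are below) =====
def Claim_equal_find_longest_consecutive_indices : Prop := ∀ (nums : List Int), Dom_find_longest_consecutive_indices nums → Spec_find_longest_consecutive_indices nums (find_longest_consecutive_indices nums)

-- ===== LEMMAS AND PROOFS =====

-- reference single scan over the difference list both ports are reduced to:
-- state = (i = position of next diff + 1, r = trailing run of 1s, bl = best run length,
--          bs = best run start); returns the final (bl, bs)
def pvScan : List Int → Int → Int → Int → Int → Int × Int
  | [], _, _, bl, bs => (bl, bs)
  | d :: ds, i, r, bl, bs =>
      let r' := if d = 1 then r + 1 else 0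
      if d = 1 ∧ r' > bl then pvScan ds (i + 1) r' r' (i - r') else pvScan ds (i + 1) r' bl bs

def pvDiffs (prev : Int) (xs : List Int) : List Int :=
  ((prev :: xs).zip xs).map (fun p => p.2 - p.1)

lemma pvScan_pos : ∀ (ds : List Int) (i r bl bs : Int), 0 ≤ bl → (bl = 0 → bs = 0) →
    0 ≤ (pvScan ds i r bl bs).1 ∧ ((pvScan ds i r bl bs).1 = 0 → (pvScan ds i r bl bs).2 = 0) := by
  intro ds
  induction ds with
  | nil => intro i r bl bs h1 h2; exact ⟨h1, h2⟩
  | cons d ds ih =>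
    intro i r bl bs h1 h2
    simp only [pvScan]
    by_cases hd : d = 1
    · subst hd
      simp only [reduceIte, true_and]
      by_cases hc : r + 1 > bl
      · rw [if_pos hc]
        exact ih _ _ _ _ (by omega) (by intro hh; omega)
      · rw [if_neg hc]
        exact ih _ _ _ _ h1 h2
    · rw [if_neg hd, if_neg (fun hh => hd hh.1)]
      exact ih _ _ _ _ h1 h2

lemma pvScan_ones : ∀ (k : Nat) (ds : List Int) (i r bl bs : Int), 0 ≤ r → r ≤ bl →
    pvScan (List.replicate k 1 ++ ds) i r bl bs =
      pvScan ds (i + k) (r + k) (if r + k > bl then r + k else bl)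
        (if r + k > bl then i - r - 1 else bs) := by
  intro k
  induction k with
  | zero =>
    intro ds i r bl bs h1 h2
    simp only [List.replicate_zero, List.nil_append, Nat.cast_zero, add_zero]
    rw [if_neg (by omega : ¬ r > bl), if_neg (by omega : ¬ r > bl)]
  | succ k ih =>
    intro ds i r bl bs h1 h2
    rw [List.replicate_succ, List.cons_append]
    simp only [pvScan, reduceIte, true_and]
    by_cases hc : r + 1 > bl
    · rw [if_pos hc, ih ds (i + 1) (r + 1) (r + 1) (i - (r + 1)) (by omega) (by omega)]
      have e1 : i + 1 + (k : Int) = i + ((k + 1 : Nat) : Int) := by push_cast; ring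
      have e2 : r + 1 + (k : Int) = r + ((k + 1 : Nat) : Int) := by push_cast; ring
      rw [e1, e2]
      have e3 : (if r + ((k + 1 : Nat) : Int) > r + 1 then r + ((k + 1 : Nat) : Int) else r + 1)
          = (if r + ((k + 1 : Nat) : Int) > bl then r + ((k + 1 : Nat) : Int) else bl) := by
        split_ifs <;> omega
      have e4 : (if r + ((k + 1 : Nat) : Int) > r + 1 then i + 1 - (r + 1) - 1 else i - (r + 1))
          = (if r + ((k + 1 : Nat) : Int) > bl then i - r - 1 else bs) := by
        split_ifs <;> omega
      rw [e3, e4]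
    · rw [if_neg hc, ih ds (i + 1) (r + 1) bl bs (by omega) (by omega)]
      have e1 : i + 1 + (k : Int) = i + ((k + 1 : Nat) : Int) := by push_cast; ring
      have e2 : r + 1 + (k : Int) = r + ((k + 1 : Nat) : Int) := by push_cast; ring
      rw [e1, e2]
      have e4 : (if r + ((k + 1 : Nat) : Int) > bl then i + 1 - (r + 1) - 1 else bs)
          = (if r + ((k + 1 : Nat) : Int) > bl then i - r - 1 else bs) := by
        split_ifs <;> omega
      rw [e4]

lemma pvScan_nonones : ∀ (k : Nat) (v : Int), v ≠ 1 → ∀ (ds : List Int) (i r bl bs : Int),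
    pvScan (List.replicate (k + 1) v ++ ds) i r bl bs = pvScan ds (i + ((k : Int) + 1)) 0 bl bs := by
  intro k v hv
  induction k with
  | zero => intro ds i r bl bs; simp [pvScan, hv]
  | succ k ih =>
    intro ds i r bl bs
    rw [List.replicate_succ, List.cons_append]
    simp only [pvScan, if_neg hv]
    rw [if_neg (fun hh => hv hh.1), ih ds (i + 1) 0 bl bs]
    congr 1
    push_cast; ring

lemma pvScan_head_ne : ∀ (ds : List Int), (∀ y ys, ds = y :: ys → y ≠ 1) →
    ∀ (i r bl bs : Int), pvScan ds i r bl bs = pvScan ds i 0 bl bs := by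
  intro ds h i r bl bs
  cases ds with
  | nil => rfl
  | cons y ys =>
    have hy : y ≠ 1 := h y ys rfl
    simp [pvScan, hy]

lemma pvRunLen_le (v : Int) : ∀ (xs : List Int), pvRunLen v xs ≤ xs.length := by
  intro xs
  induction xs with
  | nil => simp [pvRunLen]
  | cons x xs ih =>
    simp only [pvRunLen, List.length_cons]
    split_ifs <;> omega

lemma pvRunLen_take (v : Int) : ∀ (xs : List Int),
    xs.take (pvRunLen v xs) = List.replicate (pvRunLen v xs) v := by
  intro xs
  induction xs with
  | nil => simp [pvRunLen]
  | cons x xs ih =>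
    simp only [pvRunLen]
    split_ifs with h
    · subst h; simp [List.replicate_succ, ih]
    · simp

lemma pvRunLen_drop_head (v : Int) : ∀ (xs : List Int) (y : Int) (ys : List Int),
    xs.drop (pvRunLen v xs) = y :: ys → y ≠ v := by
  intro xs
  induction xs with
  | nil => intro y ys h; simp [pvRunLen] at h
  | cons x xs ih =>
    intro y ys h
    simp only [pvRunLen] at h
    by_cases hx : x = v
    · rw [if_pos hx] at h
      simp only [List.drop_succ_cons] at h
      exact ih y ys h
    · rw [if_neg hx] at h
      simp only [List.drop_zero] at h
      obtain ⟨rfl, _⟩ := List.cons.inj h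
      exact hx

lemma pvGroups_fold : ∀ (n : Nat) (ds : List Int), ds.length ≤ n → ∀ (bl bs pos : Int), 0 ≤ bl →
    (pvGroups ds).foldl pvStepB (bl, bs, pos) =
      ((pvScan ds (pos + 1) 0 bl bs).1, (pvScan ds (pos + 1) 0 bl bs).2, pos + ds.length) := by
  intro n
  induction n with
  | zero =>
    intro ds h bl bs pos hbl
    have hnil : ds = [] := List.length_eq_zero_iff.mp (Nat.le_zero.mp h)
    subst hnil
    simp [pvGroups, pvScan]
  | succ n ih =>
    intro ds h bl bs pos hbl
    cases ds with
    | nil => simp [pvGroups, pvScan]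
    | cons d xs =>
      set k0 := pvRunLen d xs with hk0
      have hsplit : d :: xs = List.replicate (k0 + 1) d ++ xs.drop k0 := by
        rw [List.replicate_succ, List.cons_append]
        conv_lhs => rw [← List.take_append_drop k0 xs]
        rw [← pvRunLen_take d xs, ← hk0]
      have hkle : k0 ≤ xs.length := pvRunLen_le d xs
      have hgr : pvGroups (d :: xs) = (d, (k0 : Int) + 1) :: pvGroups (xs.drop k0) := by
        rw [pvGroups]
      rw [hgr, List.foldl_cons]
      have hstep : pvStepB (bl, bs, pos) (d, (k0 : Int) + 1) =
          ((if d = 1 ∧ (k0 : Int) + 1 > bl then (k0 : Int) + 1 else bl),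
           (if d = 1 ∧ (k0 : Int) + 1 > bl then pos else bs), pos + ((k0 : Int) + 1)) := by
        simp only [pvStepB]
        split_ifs <;> rfl
      rw [hstep]
      have hrest : (xs.drop k0).length ≤ n := by
        simp only [List.length_drop]
        simp only [List.length_cons] at h
        omega
      rw [ih (xs.drop k0) hrest _ _ _ (by split_ifs <;> omega)]
      by_cases hd : d = 1
      · subst hd
        simp only [true_and]
        have hscan : pvScan ((1 : Int) :: xs) (pos + 1) 0 bl bs =
            pvScan (xs.drop k0) (pos + ((k0 : Int) + 1) + 1) 0
              (if (k0 : Int) + 1 > bl then (k0 : Int) + 1 else bl)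
              (if (k0 : Int) + 1 > bl then pos else bs) := by
          conv_lhs => rw [show (1 : Int) :: xs = List.replicate (k0 + 1) 1 ++ xs.drop k0 from hsplit]
          rw [pvScan_ones (k0 + 1) (xs.drop k0) (pos + 1) 0 bl bs le_rfl hbl]
          rw [pvScan_head_ne (xs.drop k0) (fun y ys hy => pvRunLen_drop_head 1 xs y ys hy)]
          have e1 : pos + 1 + ((k0 + 1 : Nat) : Int) = pos + ((k0 : Int) + 1) + 1 := by
            push_cast; ring
          have e3 : (if (0 : Int) + ((k0 + 1 : Nat) : Int) > bl then (0 : Int) + ((k0 + 1 : Nat) : Int) else bl)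
              = (if (k0 : Int) + 1 > bl then (k0 : Int) + 1 else bl) := by
            split_ifs <;> push_cast at * <;> omega
          have e4 : (if (0 : Int) + ((k0 + 1 : Nat) : Int) > bl then pos + 1 - 0 - 1 else bs)
              = (if (k0 : Int) + 1 > bl then pos else bs) := by
            split_ifs <;> push_cast at * <;> omega
          rw [e1, e3, e4]
        rw [hscan]
        simp only [Prod.mk.injEq]
        refine ⟨trivial, trivial, ?_⟩
        simp only [List.length_drop, List.length_cons]
        push_cast
        omega
      · have hscan : pvScan (d :: xs) (pos + 1) 0 bl bs =
            pvScan (xs.drop k0) (pos + ((k0 : Int) + 1) + 1) 0 bl bs := by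
          conv_lhs => rw [hsplit]
          rw [pvScan_nonones k0 d hd (xs.drop k0) (pos + 1) 0 bl bs]
          congr 1; ring
        rw [hscan]
        have hcond : ¬ (d = 1 ∧ (k0 : Int) + 1 > bl) := fun hh => hd hh.1
        rw [if_neg hcond, if_neg hcond]
        simp only [Prod.mk.injEq]
        refine ⟨trivial, trivial, ?_⟩
        simp only [List.length_drop, List.length_cons]
        push_cast
        omega

lemma pvAloop : ∀ (xs pre : List Int) (prev : Int), pre.getLast? = some prev →
    ∀ (s e ls le ml : Int), e ≤ (pre.length : Int) - 1 → s ≤ (pre.length : Int) - 1 →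
      0 ≤ ml → le = ls + ml →
    ((PySem.List.pyRange (pre.length : Int) ((pre.length : Int) + (xs.length : Int)) 1).foldl
        (pvStepA (pre ++ xs)) (s, e, ls, le, ml)).2.2 =
      ((pvScan (pvDiffs prev xs) (pre.length : Int) ((pre.length : Int) - 1 - s) ml ls).2,
       (pvScan (pvDiffs prev xs) (pre.length : Int) ((pre.length : Int) - 1 - s) ml ls).2 +
       (pvScan (pvDiffs prev xs) (pre.length : Int) ((pre.length : Int) - 1 - s) ml ls).1,
       (pvScan (pvDiffs prev xs) (pre.length : Int) ((pre.length : Int) - 1 - s) ml ls).1) := by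
  intro xs
  induction xs with
  | nil =>
    intro pre prev hlast s e ls le ml he hs hml hle
    subst hle
    rw [PySem.List.pyRange_one_eq_nil (by simp)]
    rfl
  | cons x xs' ih =>
    intro pre prev hlast s e ls le ml he hs hml hle
    have hpre : pre ≠ [] := by intro hh; subst hh; simp at hlast
    have hlen1 : 1 ≤ pre.length := List.length_pos_iff.mpr hpre
    set i0 : Int := (pre.length : Int) with hi0
    have hR : PySem.List.pyRange i0 (i0 + (((x :: xs').length : Nat) : Int)) 1
        = i0 :: PySem.List.pyRange (i0 + 1) (i0 + (((x :: xs').length : Nat) : Int)) 1 :=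
      PySem.List.pyRange_one_cons (by simp only [List.length_cons]; push_cast; omega)
    rw [hR, List.foldl_cons]
    have hget1 : PySem.List.pyGetD (pre ++ x :: xs') i0 0 = x := by
      rw [hi0, PySem.List.pyGetD_natCast, List.getD_eq_getElem?_getD,
        List.getElem?_append_right (Nat.le_refl pre.length)]
      simp
    have hget0 : PySem.List.pyGetD (pre ++ x :: xs') (i0 - 1) 0 = prev := by
      have hcast : i0 - 1 = ((pre.length - 1 : Nat) : Int) := by rw [hi0]; omega
      rw [hcast, PySem.List.pyGetD_natCast, List.getD_eq_getElem?_getD,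
        List.getElem?_append_left (by omega), ← List.getLast?_eq_getElem?, hlast]
      rfl
    have hA1 : pvStepA (pre ++ x :: xs') (s, e, ls, le, ml) i0 =
        if x = prev + 1 then
          (if i0 - s > ml then (s, i0, s, i0, i0 - s) else (s, i0, ls, le, ml))
        else (i0, e, ls, le, ml) := by
      by_cases hb : x = prev + 1
      · simp only [pvStepA, hget1, hget0, if_pos hb]
      · simp only [pvStepA, hget1, hget0, if_neg hb]
        rw [if_neg (by omega : ¬ e - i0 > ml)]
    rw [hA1]
    have hlast' : (pre ++ [x]).getLast? = some x := by simp
    have hlen' : ((pre ++ [x]).length : Int) = i0 + 1 := by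
      simp only [List.length_append, List.length_cons, List.length_nil, hi0]; push_cast; ring
    have happ : (pre ++ [x]) ++ xs' = pre ++ x :: xs' := by simp
    have hdif : pvDiffs prev (x :: xs') = (x - prev) :: pvDiffs x xs' := by
      simp [pvDiffs]
    rw [hdif]
    have hb2 : i0 + (((x :: xs').length : Nat) : Int) = i0 + 1 + ((xs'.length : Nat) : Int) := by
      simp only [List.length_cons]; push_cast; ring
    rw [hb2]
    by_cases hb : x = prev + 1
    · have hd1 : x - prev = 1 := by omega
      rw [if_pos hb]
      by_cases hc : i0 - s > ml
      · rw [if_pos hc]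
        have hi := ih (pre ++ [x]) x hlast' s i0 s i0 (i0 - s)
          (by rw [hlen']; omega) (by rw [hlen']; omega) (by omega) (by ring)
        rw [hlen', happ] at hi
        simp only [pvScan, hd1, reduceIte, true_and]
        rw [if_pos (show i0 - 1 - s + 1 > ml by omega)]
        rw [show i0 - (i0 - 1 - s + 1) = s from by ring,
            show i0 - 1 - s + 1 = i0 - s from by ring]
        rw [show i0 + 1 - 1 - s = i0 - s from by ring] at hi
        exact hi
      · rw [if_neg hc]
        have hi := ih (pre ++ [x]) x hlast' s i0 ls le ml
          (by rw [hlen']; omega) (by rw [hlen']; omega) hml hle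
        rw [hlen', happ] at hi
        simp only [pvScan, hd1, reduceIte, true_and]
        rw [if_neg (show ¬ i0 - 1 - s + 1 > ml by omega)]
        rw [show i0 - 1 - s + 1 = i0 + 1 - 1 - s from by ring]
        exact hi
    · have hd1 : x - prev ≠ 1 := by omega
      rw [if_neg hb]
      have hi := ih (pre ++ [x]) x hlast' i0 e ls le ml
        (by rw [hlen']; omega) (by rw [hlen']; omega) hml hle
      rw [hlen', happ] at hi
      simp only [pvScan, if_neg hd1]
      rw [if_neg (fun hh => hd1 hh.1)]
      rw [show i0 + 1 - 1 - i0 = (0 : Int) from by ring] at hi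
      exact hi

-- ===== VERDICT (by name: the statement is the Claim_ definition above) =====
theorem find_longest_consecutive_indices_spec : Claim_equal_find_longest_consecutive_indices := by
  intro nums _
  unfold Spec_find_longest_consecutive_indices
  cases nums with
  | nil =>
    rw [show find_longest_consecutive_indices [] = (0, 0) from by
      simp [find_longest_consecutive_indices, PySem.List.pyRange_one_eq_nil]]
    simp [find_longest_consecutive_indices_alt, pvGroups]
  | cons h rest =>
    simp only [find_longest_consecutive_indices, find_longest_consecutive_indices_alt]
    have hA := pvAloop rest [h] h (by simp) 0 0 0 0 0 (by simp) (by simp) le_rfl (by ring)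
    rw [show (([h] : List Int).length : Int) = 1 from by simp, List.singleton_append,
        show (1 : Int) - 1 - 0 = 0 from by ring] at hA
    have hdiffs : ((h :: rest).zip (h :: rest).tail).map (fun p => p.2 - p.1) = pvDiffs h rest := by
      simp [pvDiffs]
    have hB := pvGroups_fold (pvDiffs h rest).length (pvDiffs h rest) le_rfl 0 0 0 le_rfl
    rw [show (0 : Int) + 1 = 1 from by ring] at hB
    have hpos := pvScan_pos (pvDiffs h rest) 1 0 0 0 le_rfl (fun _ => rfl)
    rw [hdiffs, hB]
    rw [show ((h :: rest).length : Int) = 1 + (rest.length : Int) from by push_cast [List.length_cons]; ring] at *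
    rw [hA]
    by_cases hz : (pvScan (pvDiffs h rest) 1 0 0 0).1 = 0
    · rw [if_pos hz]
      rw [hz, hpos.2 hz]
      norm_num
    · rw [if_neg hz]
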